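-- pv_equiv track=rewrite | github.com/OpenKnowledgeMaps/Headstart | server/workers/triple/src/search_triple.py | filter_lang
-- ===== SOURCE A (Python) =====
-- def filter_lang(field, lang, content_field):
--     if lang == 'all':
--         lang = 'en'
--     filtered = [d.get(content_field)
--                 for d in field
--                 if (d.get('lang', '') == lang)]
--     if len(filtered) == 0:
--         filtered = [d.get(content_field)
--                     for d in field
--                     if (d.get('lang', '') == 'en')]
--     if len(filtered) == 0:
--         try:
--             if filtered == []:
--                 filtered.append(field[0].get(content_field))
--         except Exception:
--             filtered = [""]
--     return ". ".join(filtered)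
-- ===== SOURCE B (Python) =====
-- def filter_lang(field, lang, content_field):
--     if lang == 'all':
--         lang = 'en'
--     primary, english = [], []
--     for d in field:
--         l = d.get('lang', '')
--         c = d.get(content_field)
--         if l == lang:
--             primary.append(c)
--         if l == 'en':
--             english.append(c)
--     filtered = primary if primary else english
--     if not filtered:
--         try:
--             filtered = [field[0].get(content_field)]
--         except Exception:
--             filtered = ['']
--     return '. '.join(filtered)
-- ===== Notes on version B (the rewrite author's own statement) =====
-- stated objective: alternative
-- what changed: B replaces A's two separate list-comprehension passes (primary-language filter, then an English re-filter of the whole list) by a single loop over field that collects both candidate lists at once, then selects between them.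
import Mathlib
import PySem

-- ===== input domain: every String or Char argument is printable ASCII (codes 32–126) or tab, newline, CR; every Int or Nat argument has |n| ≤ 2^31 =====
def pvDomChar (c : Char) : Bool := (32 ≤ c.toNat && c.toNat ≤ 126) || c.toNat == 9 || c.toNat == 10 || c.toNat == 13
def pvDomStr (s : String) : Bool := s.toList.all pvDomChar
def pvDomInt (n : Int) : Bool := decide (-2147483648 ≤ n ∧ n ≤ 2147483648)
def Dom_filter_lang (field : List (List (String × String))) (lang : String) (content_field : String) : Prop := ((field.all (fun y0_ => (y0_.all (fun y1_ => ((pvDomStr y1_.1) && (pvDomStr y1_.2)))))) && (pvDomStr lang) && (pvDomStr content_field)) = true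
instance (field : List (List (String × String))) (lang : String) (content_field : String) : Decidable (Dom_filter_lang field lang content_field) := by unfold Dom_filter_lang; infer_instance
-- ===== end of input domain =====

-- B merges A's two separate filtering passes into one loop that collects both candidate
-- lists at once (objective: alternative decomposition, same cost). Equivalence of the
-- return value is proved on Pre_, which excludes inputs where Python's '. '.join raises.

-- d.get(k)  (Python dict.get, no default → None)
def pvGet (d : List (String × String)) (k : String) : Option String :=
  (PySem.Dict.mk d).get? k

-- d.get(k, dflt)
def pvGetD (d : List (String × String)) (k : String) (dflt : String) : String :=
  PySem.Dict.getD (PySem.Dict.mk d) k dflt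

-- ===== PORT A =====
-- Exact except at the final join: where the Python list holds None, Python raises
-- TypeError; the port substitutes "" there — those inputs are excluded by Pre_.
def filter_lang (field : List (List (String × String))) (lang : String) (content_field : String) : String :=
  let lang := if lang == "all" then "en" else lang
  let filtered : List (Option String) :=
    (field.filter (fun d => pvGetD d "lang" "" == lang)).map (fun d => pvGet d content_field)
  let filtered :=
    if filtered.length == 0 then
      (field.filter (fun d => pvGetD d "lang" "" == "en")).map (fun d => pvGet d content_field)
    else filtered
  let filtered :=
    if filtered.length == 0 then
      -- try: filtered.append(field[0].get(content_field)) except Exception: filtered = [""]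
      match field with
      | [] => [some ""]
      | d :: _ => [pvGet d content_field]
    else filtered
  PySem.Str.join ". " (filtered.map (fun o => o.getD ""))

-- ===== PORT B =====
-- One pass building (primary, english) together; same join caveat as port A.
def filter_lang_alt (field : List (List (String × String))) (lang : String) (content_field : String) : String :=
  let lang := if lang == "all" then "en" else lang
  let pe : List (Option String) × List (Option String) :=
    field.foldl (fun acc d =>
      let l := pvGetD d "lang" ""
      let c := pvGet d content_field
      (if l == lang then acc.1 ++ [c] else acc.1,
       if l == "en" then acc.2 ++ [c] else acc.2)) ([], [])
  let filtered := if pe.1 ≠ [] then pe.1 else pe.2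
  let filtered :=
    if filtered = [] then
      match field with
      | [] => [some ""]
      | d :: _ => [pvGet d content_field]
    else filtered
  PySem.Str.join ". " (filtered.map (fun o => o.getD ""))

-- ===== PRECONDITION & SPEC =====
-- Pre_ excludes exactly the inputs where the joined list contains None, on which
-- Python A raises TypeError in '. '.join.
def Pre_filter_lang (field : List (List (String × String))) (lang : String) (content_field : String) : Prop :=
  let L := if lang == "all" then "en" else lang
  let prim := field.filter (fun d => pvGetD d "lang" "" == L)
  let eng := field.filter (fun d => pvGetD d "lang" "" == "en")
  if prim ≠ [] then ∀ d ∈ prim, (pvGet d content_field).isSome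
  else if eng ≠ [] then ∀ d ∈ eng, (pvGet d content_field).isSome
  else ∀ d ∈ field.take 1, (pvGet d content_field).isSome

instance (field : List (List (String × String))) (lang : String) (content_field : String) : Decidable (Pre_filter_lang field lang content_field) := by unfold Pre_filter_lang; infer_instance

def pvWitness_filter_lang : (List (List (String × String))) × String × String :=
  ([[("lang", "en"), ("title", "hello")], [("lang", "de"), ("title", "hallo")]], "en", "title")

def Spec_filter_lang (field : List (List (String × String))) (lang : String) (content_field : String) (out : String) : Prop := out = filter_lang_alt field lang content_field
instance (field : List (List (String × String))) (lang : String) (content_field : String) (out : String) : Decidable (Spec_filter_lang field lang content_field out) := by unfold Spec_filter_lang; infer_instance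

-- ===== CLAIM (what is proved, stated in full; the proofs are below) =====
def Claim_equal_filter_lang : Prop := ∀ (field : List (List (String × String))) (lang : String) (content_field : String), Dom_filter_lang field lang content_field → Pre_filter_lang field lang content_field → Spec_filter_lang field lang content_field (filter_lang field lang content_field)

-- ===== LEMMAS AND PROOFS =====

-- B's single fold produces exactly A's two filtered-and-mapped lists.
theorem pairfold_eq (L : String) (cf : String) :
    ∀ (field : List (List (String × String))) (a b : List (Option String)),
      field.foldl (fun acc d =>
        let l := pvGetD d "lang" ""
        let c := pvGet d cf
        (if l == L then acc.1 ++ [c] else acc.1,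
         if l == "en" then acc.2 ++ [c] else acc.2)) (a, b)
      = (a ++ (field.filter (fun d => pvGetD d "lang" "" == L)).map (fun d => pvGet d cf),
         b ++ (field.filter (fun d => pvGetD d "lang" "" == "en")).map (fun d => pvGet d cf)) := by
  intro field
  induction field with
  | nil => simp
  | cons d rest ih =>
    intro a b
    simp only [List.foldl_cons, List.filter_cons]
    rw [ih]
    by_cases h1 : (pvGetD d "lang" "" == L) = true <;>
      by_cases h2 : (pvGetD d "lang" "" == "en") = true <;>
      simp [h1, h2]

theorem filter_lang_spec_aux :
    ∀ (field : List (List (String × String))) (lang : String) (content_field : String),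
      Spec_filter_lang field lang content_field (filter_lang field lang content_field) := by
  intro field lang content_field
  unfold Spec_filter_lang filter_lang filter_lang_alt
  simp only [pairfold_eq, List.nil_append]
  set prim := (field.filter (fun d => pvGetD d "lang" "" == (if lang == "all" then "en" else lang))).map (fun d => pvGet d content_field) with hprim
  set eng := (field.filter (fun d => pvGetD d "lang" "" == "en")).map (fun d => pvGet d content_field) with heng
  by_cases hp : prim = [] <;> by_cases he : eng = [] <;>
    simp [hp, he, List.length_eq_zero_iff]

-- ===== VERDICT (by name: the statement is the Claim_ definition above) =====
theorem filter_lang_spec : Claim_equal_filter_lang := by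
  intro field lang content_field _ _
  exact filter_lang_spec_aux field lang content_field
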